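-- pv_equiv track=rewrite | github.com/doctorio228/module_2_hard | module_2_hard.py | password_com
-- ===== SOURCE A (Python) =====
-- def password_com(n):
--     if 3 > n and n < 20:
--         return "Число должно быть от 3 до 20! "
--     password = ''
--     pairs = set()
--     for i in range(1, n + 1):
--         for j in range(1, n + 1):
--             if i != j:
--                 sum = i + j
--                 if n % sum == 0:
--                     pair = f'{i}{j}'
--                     pair2 = f'{j}{i}'
--                     if pair not in pairs:
--                         password += pair
--                         pairs.add(pair)
--                         pairs.add(pair2)
--     return password
-- ===== SOURCE B (Python) =====
-- def password_com(n):
--     if n < 3: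
--         return "Число должно быть от 3 до 20! "
--     # all divisors of n, by trial division up to sqrt(n)
--     small = []
--     large = []
--     k = 1
--     while k * k <= n:
--         if n % k == 0:
--             small.append(k)
--             if k != n // k:
--                 large.append(n // k)
--         k += 1
--     divs = small + large[::-1]  # sorted list of divisors of n
--     password = ''
--     seen = set()
--     for i in range(1, n):
--         for d in divs:
--             if d > i and d - i != i:
--                 j = d - i
--                 pair = f'{i}{j}'
--                 if pair not in seen:
--                     password += pair
--                     seen.add(pair)
--                     seen.add(f'{j}{i}')
--     return password
-- ===== Notes on version B (the rewrite author's own statement) =====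
-- stated objective: faster
-- what changed: Replaces A's O(n^2) double loop over all (i,j) pairs by a sqrt(n) trial-division enumeration of the divisors of n; for each i only the divisors d>i are scanned and j=d-i is derived, with the same string-set deduplication.
import Mathlib
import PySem

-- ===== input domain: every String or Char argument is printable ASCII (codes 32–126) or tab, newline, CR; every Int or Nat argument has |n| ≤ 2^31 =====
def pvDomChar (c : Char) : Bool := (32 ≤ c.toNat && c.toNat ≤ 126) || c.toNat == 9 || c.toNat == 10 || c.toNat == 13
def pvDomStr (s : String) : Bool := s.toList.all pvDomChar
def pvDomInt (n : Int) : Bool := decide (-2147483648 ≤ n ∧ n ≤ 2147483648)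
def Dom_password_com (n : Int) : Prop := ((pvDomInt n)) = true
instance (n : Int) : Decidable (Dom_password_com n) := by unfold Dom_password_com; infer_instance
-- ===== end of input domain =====

-- B replaces A's O(n^2) double loop over all (i, j) by a sqrt(n) trial-division enumeration of the
-- divisors of n, deriving j = d - i for each divisor d > i (objective: faster).

-- ===== PORT A =====
def password_com (n : Int) : String :=
  if 3 > n ∧ n < 20 then "Число должно быть от 3 до 20! "
  else
    ((PySem.List.pyRange 1 (n+1) 1).foldl (fun st i =>
        (PySem.List.pyRange 1 (n+1) 1).foldl (fun st j =>
          if i ≠ j then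
            let sum := i + j
            if PySem.Int.mod n sum = 0 then
              let pair := PySem.Int.toStr i ++ PySem.Int.toStr j
              let pair2 := PySem.Int.toStr j ++ PySem.Int.toStr i
              if ¬ (PySem.Set.contains st.2 pair = true) then
                (st.1 ++ pair, PySem.Set.add (PySem.Set.add st.2 pair) pair2)
              else st
            else st
          else st) st)
      (("", PySem.Set.empty) : String × PySem.Set String)).1

-- ===== PORT B =====
-- B-side helper: the 'while k * k <= n' trial-division loop of Source B
-- (fuel = n+1 bounds the loop: k starts at 1 and k*k ≤ n forces k ≤ n, so the 0 branch is unreachable)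
def pvDivLoop (n : Int) (fuel : Nat) (k : Int) (small large : List Int) : List Int × List Int :=
  match fuel with
  | 0 => (small, large)
  | fuel + 1 =>
    if k * k ≤ n then
      if PySem.Int.mod n k = 0 then
        pvDivLoop n fuel (k+1) (small ++ [k])
          (if k ≠ PySem.Int.floordiv n k then large ++ [PySem.Int.floordiv n k] else large)
      else pvDivLoop n fuel (k+1) small large
    else (small, large)

def password_com_alt (n : Int) : String :=
  if n < 3 then "Число должно быть от 3 до 20! "
  else
    let p := pvDivLoop n (n+1).toNat 1 [] []
    let divs := p.1 ++ p.2.reverse   -- small + large[::-1] (PySem.List.slice?_none_none_neg_one)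
    ((PySem.List.pyRange 1 n 1).foldl (fun st i =>
        divs.foldl (fun st d =>
          if d > i ∧ d - i ≠ i then
            let j := d - i
            let pair := PySem.Int.toStr i ++ PySem.Int.toStr j
            if ¬ (PySem.Set.contains st.2 pair = true) then
              (st.1 ++ pair, PySem.Set.add (PySem.Set.add st.2 pair) (PySem.Int.toStr j ++ PySem.Int.toStr i))
            else st
          else st) st)
      (("", PySem.Set.empty) : String × PySem.Set String)).1

-- ===== PRECONDITION & SPEC =====
def Spec_password_com (n : Int) (out : String) : Prop := out = password_com_alt n
instance (n : Int) (out : String) : Decidable (Spec_password_com n out) := by unfold Spec_password_com; infer_instance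

-- ===== CLAIM (what is proved, stated in full; the proofs are below) =====
def Claim_equal_password_com : Prop := ∀ (n : Int), Dom_password_com n → Spec_password_com n (password_com n)

-- ===== LEMMAS AND PROOFS =====

-- the body both loops perform on an admitted pair (i, j)
def pvBody (i : Int) (st : String × PySem.Set String) (j : Int) : String × PySem.Set String :=
  let pair := PySem.Int.toStr i ++ PySem.Int.toStr j
  if ¬ (PySem.Set.contains st.2 pair = true) then
    (st.1 ++ pair, PySem.Set.add (PySem.Set.add st.2 pair) (PySem.Int.toStr j ++ PySem.Int.toStr i))
  else st

-- the increasing list of positive divisors of n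
def pvDivs (n : Int) : List Int :=
  (PySem.List.pyRange 1 (n+1) 1).filter (fun d => decide (PySem.Int.mod n d = 0))

-- the j's admitted by A's inner loop at a given i
def pvFA (n i : Int) : List Int :=
  (PySem.List.pyRange 1 (n+1) 1).filter (fun j => decide (i ≠ j ∧ PySem.Int.mod n (i+j) = 0))

def pvQ (n : Int) : Int := (Nat.sqrt n.toNat : Int)

lemma pvQ_iff (n k : Int) (hn : 1 ≤ n) (hk : 1 ≤ k) : k * k ≤ n ↔ k ≤ pvQ n := by
  unfold pvQ
  have hk' : ((k.toNat : Int)) = k := Int.toNat_of_nonneg (by omega)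
  have hn' : ((n.toNat : Int)) = n := Int.toNat_of_nonneg (by omega)
  constructor
  · intro h
    have h1 : k.toNat * k.toNat ≤ n.toNat := by
      have : ((k.toNat * k.toNat : Nat) : Int) ≤ ((n.toNat : Nat) : Int) := by
        push_cast; rw [hk', hn']; exact h
      exact_mod_cast this
    have h2 : k.toNat ≤ Nat.sqrt n.toNat := Nat.le_sqrt'.mpr (by rwa [pow_two])
    omega
  · intro h
    have h2 : k.toNat ≤ Nat.sqrt n.toNat := by omega
    have h1 : k.toNat * k.toNat ≤ n.toNat := by
      have := Nat.le_sqrt'.mp h2; rwa [pow_two] at this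
    calc k * k = ((k.toNat * k.toNat : Nat) : Int) := by push_cast; rw [hk']
    _ ≤ ((n.toNat : Nat) : Int) := by exact_mod_cast h1
    _ = n := hn'

lemma pvQ_pos (n : Int) (hn : 1 ≤ n) : 1 ≤ pvQ n := by
  unfold pvQ
  have := Nat.sqrt_pos (n := n.toNat)
  omega

-- the trial-division loop collects the divisors up to sqrt(n) (increasing) and the cofactors (in the same order)
lemma pvDivLoop_spec (n : Int) (hn : 1 ≤ n) :
    ∀ (fuel : Nat) (k : Int) (small large : List Int), 1 ≤ k → (pvQ n + 1 - k).toNat < fuel →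
    pvDivLoop n fuel k small large
      = (small ++ (PySem.List.pyRange k (pvQ n + 1) 1).filter (fun d => decide (PySem.Int.mod n d = 0)),
         large ++ ((PySem.List.pyRange k (pvQ n + 1) 1).filter
             (fun d => decide (PySem.Int.mod n d = 0 ∧ d ≠ PySem.Int.floordiv n d))).map
           (fun d => PySem.Int.floordiv n d)) := by
  intro fuel
  induction fuel with
  | zero =>
    intro k small large hk hm
    omega
  | succ m ih =>
    intro k small large hk hm
    by_cases hle : k * k ≤ n
    · have hkq : k ≤ pvQ n := (pvQ_iff n k hn hk).mp hle
      have hr : PySem.List.pyRange k (pvQ n + 1) 1 = k :: PySem.List.pyRange (k+1) (pvQ n + 1) 1 :=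
        PySem.List.pyRange_one_cons (by omega)
      rw [pvDivLoop, if_pos hle]
      by_cases hmod : PySem.Int.mod n k = 0
      · rw [if_pos hmod, ih (k+1) _ _ (by omega) (by omega), hr]
        by_cases hne : k ≠ PySem.Int.floordiv n k
        · rw [if_pos hne]
          simp [hmod, hne]
        · rw [if_neg hne]
          simp at hne
          simp [hmod, ← hne]
      · rw [if_neg hmod, ih (k+1) _ _ (by omega) (by omega), hr]
        simp [hmod]
    · have hkq : pvQ n < k := by
        by_contra h
        exact hle ((pvQ_iff n k hn hk).mpr (by omega))
      rw [pvDivLoop, if_neg hle, PySem.List.pyRange_one_eq_nil (by omega)]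
      simp

-- two strictly increasing lists with the same members are equal
lemma pv_sorted_ext (l₁ l₂ : List Int) (h₁ : l₁.Pairwise (·<·)) (h₂ : l₂.Pairwise (·<·))
    (hm : ∀ x, x ∈ l₁ ↔ x ∈ l₂) : l₁ = l₂ := by
  have hp : l₁.Perm l₂ := (List.perm_ext_iff_of_nodup (h₁.imp ne_of_lt) (h₂.imp ne_of_lt)).mpr hm
  exact hp.eq_of_pairwise (fun a b _ _ hab hba => absurd hba (lt_asymm hab)) h₁ h₂

lemma pv_cofactor_mul (n d : Int) (hd : d ∣ n) : n / d * d = n := Int.ediv_mul_cancel hd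

lemma pv_cofactor_pos (n d : Int) (hn : 1 ≤ n) (hd1 : 1 ≤ d) (hd : d ∣ n) : 1 ≤ n / d := by
  have h := pv_cofactor_mul n d hd
  nlinarith

-- a divisor d ≤ sqrt(n) with d ≠ n/d has cofactor above sqrt(n)
lemma pv_pair_large (n d : Int) (hn : 1 ≤ n) (hd1 : 1 ≤ d) (hdq : d ≤ pvQ n) (hdvd : d ∣ n)
    (hne : d ≠ n / d) : pvQ n < n / d := by
  set e := n / d with he
  have hmul : e * d = n := pv_cofactor_mul n d hdvd
  have he1 : 1 ≤ e := pv_cofactor_pos n d hn hd1 hdvd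
  by_contra hcon
  have heq : e ≤ pvQ n := by omega
  have h1 : e * e ≤ n := (pvQ_iff n e hn he1).mpr heq
  have h2 : d * d ≤ n := (pvQ_iff n d hn hd1).mpr hdq
  have hde : d = e := by nlinarith
  exact hne (by omega)

-- every divisor above sqrt(n) is the cofactor of a divisor below it
lemma pv_large_compl (n x : Int) (hn : 1 ≤ n) (hq : pvQ n < x) (hx : x ≤ n) (hdvd : x ∣ n) :
    ∃ d, 1 ≤ d ∧ d ≤ pvQ n ∧ d ∣ n ∧ d ≠ n / d ∧ n / d = x := by
  have hx1 : 1 ≤ x := by have := pvQ_pos n hn; omega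
  refine ⟨n / x, ?_, ?_, ?_, ?_, ?_⟩
  case _ => exact pv_cofactor_pos n x hn hx1 hdvd
  all_goals {
    have hmul : n / x * x = n := pv_cofactor_mul n x hdvd
    have hd1 : 1 ≤ n / x := pv_cofactor_pos n x hn hx1 hdvd
    have hdx : n / x < x := by
      by_contra hcon
      have : x * x ≤ n := by nlinarith
      have := (pvQ_iff n x hn hx1).mp this
      omega
    have hdq : n / x ≤ pvQ n := by
      have : (n / x) * (n / x) ≤ n := by nlinarith
      exact (pvQ_iff n (n / x) hn hd1).mp this
    have hdd : (n / x) ∣ n := ⟨x, by linarith⟩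
    have hnx : n / (n / x) = x := by
      have hne0 : n / x ≠ 0 := by omega
      calc n / (n / x) = ((n / x) * x) / (n / x) := by rw [hmul]
      _ = x := Int.mul_ediv_cancel_left x hne0
    first
      | exact hdq
      | exact hdd
      | (rw [hnx]; omega)
      | exact hnx
  }

-- divisors have strictly antitone cofactors
lemma pv_div_lt (n a b : Int) (ha : 1 ≤ a) (hab : a < b) (hda : a ∣ n) (hdb : b ∣ n)
    (hn : 1 ≤ n) : n / b < n / a := by
  have h1 : n / a * a = n := pv_cofactor_mul n a hda
  have h2 : n / b * b = n := pv_cofactor_mul n b hdb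
  have hb1 : 1 ≤ n / b := pv_cofactor_pos n b hn (by omega) hdb
  by_contra hcon
  nlinarith

lemma pv_mem_divs (n x : Int) :
    x ∈ pvDivs n ↔ 1 ≤ x ∧ x ≤ n ∧ x ∣ n := by
  simp only [pvDivs, List.mem_filter, PySem.List.mem_pyRange_one, decide_eq_true_eq,
    PySem.Int.mod_eq_zero_iff_dvd]
  constructor
  · rintro ⟨⟨h1, h2⟩, h3⟩; exact ⟨h1, by omega, h3⟩
  · rintro ⟨h1, h2, h3⟩; exact ⟨⟨h1, by omega⟩, h3⟩

lemma pv_divs_sorted (n : Int) : (pvDivs n).Pairwise (·<·) :=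
  (PySem.List.pairwise_lt_pyRange_one 1 (n+1)).filter _

-- the small list and the reversed large list together are exactly the sorted divisor list
lemma pv_divs_eq (n : Int) (hn : 3 ≤ n) :
    (pvDivLoop n (n+1).toNat 1 [] []).1 ++ (pvDivLoop n (n+1).toNat 1 [] []).2.reverse = pvDivs n := by
  have hn1 : (1:Int) ≤ n := by omega
  have hq1 := pvQ_pos n hn1
  have hqn : pvQ n ≤ n := by
    have h1 : pvQ n * pvQ n ≤ n := (pvQ_iff n (pvQ n) hn1 hq1).mpr le_rfl
    nlinarith
  rw [pvDivLoop_spec n hn1 ((n+1).toNat) 1 [] [] le_rfl (by omega)]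
  simp only [List.nil_append]
  -- membership facts for the filtered range
  have hmemF : ∀ (x : Int),
      x ∈ (PySem.List.pyRange 1 (pvQ n + 1) 1).filter
        (fun d => decide (PySem.Int.mod n d = 0 ∧ d ≠ PySem.Int.floordiv n d))
      ↔ 1 ≤ x ∧ x ≤ pvQ n ∧ x ∣ n ∧ x ≠ n / x := by
    intro x
    simp only [List.mem_filter, PySem.List.mem_pyRange_one, decide_eq_true_eq,
      PySem.Int.mod_eq_zero_iff_dvd]
    constructor
    · rintro ⟨⟨h1, h2⟩, h3, h4⟩
      rw [PySem.Int.floordiv_eq_ediv_of_pos (by omega)] at h4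
      exact ⟨h1, by omega, h3, h4⟩
    · rintro ⟨h1, h2, h3, h4⟩
      rw [PySem.Int.floordiv_eq_ediv_of_pos (by omega)]
      exact ⟨⟨h1, by omega⟩, h3, h4⟩
  apply pv_sorted_ext
  · -- sortedness of small ++ large.reverse
    rw [List.pairwise_append]
    refine ⟨(PySem.List.pairwise_lt_pyRange_one 1 (pvQ n + 1)).filter _, ?_, ?_⟩
    · rw [List.pairwise_reverse]
      rw [List.pairwise_map]
      have hp : ((PySem.List.pyRange 1 (pvQ n + 1) 1).filter
          (fun d => decide (PySem.Int.mod n d = 0 ∧ d ≠ PySem.Int.floordiv n d))).Pairwise (·<·) :=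
        (PySem.List.pairwise_lt_pyRange_one 1 (pvQ n + 1)).filter _
      refine hp.imp_of_mem ?_
      intro a b ha hb hab
      obtain ⟨ha1, _, ha3, _⟩ := (hmemF a).mp ha
      obtain ⟨hb1, _, hb3, _⟩ := (hmemF b).mp hb
      show PySem.Int.floordiv n b < PySem.Int.floordiv n a
      rw [PySem.Int.floordiv_eq_ediv_of_pos (by omega), PySem.Int.floordiv_eq_ediv_of_pos (by omega)]
      exact pv_div_lt n a b ha1 hab ha3 hb3 hn1
    · intro a ha b hb
      rw [List.mem_reverse] at hb
      simp only [List.mem_filter, PySem.List.mem_pyRange_one, decide_eq_true_eq] at ha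
      obtain ⟨⟨ha1, ha2⟩, _⟩ := ha
      rw [List.mem_map] at hb
      obtain ⟨d, hd, rfl⟩ := hb
      obtain ⟨hd1, hd2, hd3, hd4⟩ := (hmemF d).mp hd
      rw [PySem.Int.floordiv_eq_ediv_of_pos (by omega)]
      have := pv_pair_large n d hn1 hd1 hd2 hd3 hd4
      omega
  · exact pv_divs_sorted n
  · intro x
    rw [pv_mem_divs n x, List.mem_append, List.mem_reverse, List.mem_map]
    constructor
    · rintro (hx | ⟨d, hd, rfl⟩)
      · simp only [List.mem_filter, PySem.List.mem_pyRange_one, decide_eq_true_eq,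
          PySem.Int.mod_eq_zero_iff_dvd] at hx
        obtain ⟨⟨h1, h2⟩, h3⟩ := hx
        have hqn : pvQ n ≤ n := by
          have : pvQ n * pvQ n ≤ n := (pvQ_iff n (pvQ n) hn1 hq1).mpr le_rfl
          nlinarith
        exact ⟨h1, by omega, h3⟩
      · obtain ⟨hd1, hd2, hd3, hd4⟩ := (hmemF d).mp hd
        rw [PySem.Int.floordiv_eq_ediv_of_pos (by omega)]
        have hc1 := pv_cofactor_pos n d hn1 hd1 hd3
        have hcd : (n / d) ∣ n := ⟨d, by have := pv_cofactor_mul n d hd3; linarith⟩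
        exact ⟨hc1, Int.le_of_dvd (by omega) hcd, hcd⟩
    · rintro ⟨h1, h2, h3⟩
      by_cases hq : x ≤ pvQ n
      · left
        simp only [List.mem_filter, PySem.List.mem_pyRange_one, decide_eq_true_eq,
          PySem.Int.mod_eq_zero_iff_dvd]
        exact ⟨⟨h1, by omega⟩, h3⟩
      · right
        obtain ⟨d, hd1, hd2, hd3, hd4, hd5⟩ := pv_large_compl n x hn1 (by omega) h2 h3
        refine ⟨d, (hmemF d).mpr ⟨hd1, hd2, hd3, hd4⟩, ?_⟩
        rw [PySem.Int.floordiv_eq_ediv_of_pos (by omega)]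
        exact hd5

-- the divisors of n that exceed i (minus d = 2i) are exactly i + (the admitted j's of A's inner loop)
lemma pv_filter_eq (n i : Int) (hn : 3 ≤ n) (hi : 1 ≤ i) :
    (pvDivs n).filter (fun d => decide (d > i ∧ d - i ≠ i))
      = (pvFA n i).map (fun j => i + j) := by
  unfold pvFA
  apply pv_sorted_ext
  · exact (pv_divs_sorted n).filter _
  · rw [List.pairwise_map]
    exact ((PySem.List.pairwise_lt_pyRange_one 1 (n+1)).filter _).imp (by omega)
  · intro x
    simp only [List.mem_filter, List.mem_map, PySem.List.mem_pyRange_one, decide_eq_true_eq,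
      PySem.Int.mod_eq_zero_iff_dvd]
    constructor
    · rintro ⟨hx, h4, h5⟩
      obtain ⟨h1, h2, h3⟩ := (pv_mem_divs n x).mp hx
      exact ⟨x - i, ⟨⟨by omega, by omega⟩, by omega, by rwa [show i + (x - i) = x by ring]⟩, by ring⟩
    · rintro ⟨j, ⟨⟨hj1, hj2⟩, hij, hdvd⟩, rfl⟩
      have hle : i + j ≤ n := Int.le_of_dvd (by omega) hdvd
      exact ⟨(pv_mem_divs n (i + j)).mpr ⟨by omega, hle, hdvd⟩, by omega, by omega⟩

-- A's inner loop is the fold of pvBody over the admitted j's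
lemma pv_innerA (n i : Int) (st : String × PySem.Set String) :
    (PySem.List.pyRange 1 (n+1) 1).foldl (fun st j =>
        if i ≠ j then
          let sum := i + j
          if PySem.Int.mod n sum = 0 then
            let pair := PySem.Int.toStr i ++ PySem.Int.toStr j
            let pair2 := PySem.Int.toStr j ++ PySem.Int.toStr i
            if ¬ (PySem.Set.contains st.2 pair = true) then
              (st.1 ++ pair, PySem.Set.add (PySem.Set.add st.2 pair) pair2)
            else st
          else st
        else st) st
      = (pvFA n i).foldl (pvBody i) st := by
  have hfun : (fun (st : String × PySem.Set String) (j : Int) =>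
      if i ≠ j then
        let sum := i + j
        if PySem.Int.mod n sum = 0 then
          let pair := PySem.Int.toStr i ++ PySem.Int.toStr j
          let pair2 := PySem.Int.toStr j ++ PySem.Int.toStr i
          if ¬ (PySem.Set.contains st.2 pair = true) then
            (st.1 ++ pair, PySem.Set.add (PySem.Set.add st.2 pair) pair2)
          else st
        else st
      else st)
      = (fun st j => if i ≠ j ∧ PySem.Int.mod n (i+j) = 0 then pvBody i st j else st) := by
    funext st j
    by_cases h1 : i = j
    · simp [h1]
    · by_cases h2 : PySem.Int.mod n (i+j) = 0 <;> simp [pvBody, h1, h2]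
  rw [hfun, PySem.List.foldl_ite_eq_foldl_filter]
  rfl

-- B's inner loop is the fold of pvBody (at j = d - i) over the admitted d's
lemma pv_innerB (i : Int) (divs : List Int) (st : String × PySem.Set String) :
    divs.foldl (fun st d =>
        if d > i ∧ d - i ≠ i then
          let j := d - i
          let pair := PySem.Int.toStr i ++ PySem.Int.toStr j
          if ¬ (PySem.Set.contains st.2 pair = true) then
            (st.1 ++ pair, PySem.Set.add (PySem.Set.add st.2 pair) (PySem.Int.toStr j ++ PySem.Int.toStr i))
          else st
        else st) st
      = (divs.filter (fun d => decide (d > i ∧ d - i ≠ i))).foldl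
          (fun st d => pvBody i st (d - i)) st := by
  have hfun : (fun (st : String × PySem.Set String) (d : Int) =>
      if d > i ∧ d - i ≠ i then
        let j := d - i
        let pair := PySem.Int.toStr i ++ PySem.Int.toStr j
        if ¬ (PySem.Set.contains st.2 pair = true) then
          (st.1 ++ pair, PySem.Set.add (PySem.Set.add st.2 pair) (PySem.Int.toStr j ++ PySem.Int.toStr i))
        else st
      else st)
      = (fun st d => if d > i ∧ d - i ≠ i then pvBody i st (d - i) else st) := by
    funext st d
    by_cases h : d > i ∧ d - i ≠ i <;> simp [pvBody, h]
  rw [hfun, PySem.List.foldl_ite_eq_foldl_filter]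

-- at i = n the inner loop of A admits nothing
lemma pv_last (n : Int) (hn : 3 ≤ n) : pvFA n n = [] := by
  unfold pvFA
  rw [List.filter_eq_nil_iff]
  intro j hj
  rw [PySem.List.mem_pyRange_one] at hj
  simp only [decide_eq_true_eq, PySem.Int.mod_eq_zero_iff_dvd, not_and]
  intro _ hdvd
  have := Int.le_of_dvd (by omega) hdvd
  omega

lemma pv_main (n : Int) : password_com n = password_com_alt n := by
  by_cases hn : n < 3
  · unfold password_com password_com_alt
    rw [if_pos ⟨by omega, by omega⟩, if_pos hn]
  · have hn3 : 3 ≤ n := by omega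
    unfold password_com password_com_alt
    rw [if_neg (fun h => absurd h.1 (by omega)), if_neg hn]
    show (_ : String × PySem.Set String).1 = (_ : String × PySem.Set String).1
    congr 1
    rw [pv_divs_eq n hn3]
    have hA : (fun (st : String × PySem.Set String) (i : Int) =>
        (PySem.List.pyRange 1 (n+1) 1).foldl (fun st j =>
          if i ≠ j then
            let sum := i + j
            if PySem.Int.mod n sum = 0 then
              let pair := PySem.Int.toStr i ++ PySem.Int.toStr j
              let pair2 := PySem.Int.toStr j ++ PySem.Int.toStr i
              if ¬ (PySem.Set.contains st.2 pair = true) then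
                (st.1 ++ pair, PySem.Set.add (PySem.Set.add st.2 pair) pair2)
              else st
            else st
          else st) st)
        = fun st i => (pvFA n i).foldl (pvBody i) st := by
      funext st i
      exact pv_innerA n i st
    rw [hA]
    rw [PySem.List.pyRange_one_succ_right (by omega : (1:Int) ≤ n), List.foldl_append,
        List.foldl_cons, List.foldl_nil, pv_last n hn3, List.foldl_nil]
    apply PySem.List.foldl_congr_mem
    intro st i hi
    obtain ⟨hi1, hi2⟩ := (PySem.List.mem_pyRange_one).mp hi
    rw [pv_innerB, pv_filter_eq n i hn3 hi1, List.foldl_map]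
    apply PySem.List.foldl_congr_mem
    intro acc j _
    rw [show i + j - i = j by ring]

-- ===== VERDICT (by name: the statement is the Claim_ definition above) =====
theorem password_com_spec : Claim_equal_password_com := by
  intro n _
  unfold Spec_password_com
  exact pv_main n
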